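-- pv_equiv track=rewrite | github.com/h920032/IM_project | fixed/tool.py | SetVACnext
-- ===== SOURCE A (Python) =====
-- def SetVACnext(MONTH_start, nDAY, DATE_list):
--     ans = []
--     ans2 = []
--     #第一天不是1 / 第一天是1
--     if DATE_list[0]!=1:
--         ans.append(0)
--     elif (MONTH_start == 0 and DATE_list[0]==1):
--         ans.append(0)
--     else:
--         ans2.append(0)
--
--
--     for i,day in enumerate(DATE_list):
--         if i==0:
--             continue
--         else:
--             #我的前一天不是我的數字-1(代表前一天放假)
--             if(day-1!=DATE_list[i-1]):
--                 ans.append(i)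
--             else:
--                 ans2.append(i)
--     return ans, ans2
-- ===== SOURCE B (Python) =====
-- def SetVACnext(MONTH_start, nDAY, DATE_list):
--     first = DATE_list[0]
--     ans = [0] if (first != 1 or MONTH_start == 0) else []
--     ans += [i for i in range(1, len(DATE_list)) if DATE_list[i] - 1 != DATE_list[i - 1]]
--     in_ans = set(ans)
--     ans2 = [i for i in range(len(DATE_list)) if i not in in_ans]
--     return ans, ans2
-- ===== Notes on version B (the rewrite author's own statement) =====
-- stated objective: simpler
-- what changed: B collapses A's three-way first-index branching into the single condition 'DATE_list[0]!=1 or MONTH_start==0', builds only ans in one comprehension pass, and derives ans2 as the set-complement over range(len(DATE_list)) instead of maintaining a second append-branch inside the loop.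
import Mathlib
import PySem

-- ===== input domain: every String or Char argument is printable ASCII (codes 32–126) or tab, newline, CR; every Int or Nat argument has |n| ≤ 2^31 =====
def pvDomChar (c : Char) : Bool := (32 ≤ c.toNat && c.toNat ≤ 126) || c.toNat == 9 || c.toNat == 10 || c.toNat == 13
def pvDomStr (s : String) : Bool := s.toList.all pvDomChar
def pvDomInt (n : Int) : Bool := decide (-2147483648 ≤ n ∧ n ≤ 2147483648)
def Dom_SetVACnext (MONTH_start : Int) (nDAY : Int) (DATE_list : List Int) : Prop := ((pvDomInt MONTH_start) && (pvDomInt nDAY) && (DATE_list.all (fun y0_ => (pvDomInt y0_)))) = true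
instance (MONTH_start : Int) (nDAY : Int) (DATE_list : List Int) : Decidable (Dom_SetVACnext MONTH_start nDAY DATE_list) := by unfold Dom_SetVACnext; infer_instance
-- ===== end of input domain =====

-- B collapses A's three-way first-index branching into the single condition
-- 'DATE_list[0] != 1 or MONTH_start == 0', builds only ans in one pass, and derives
-- ans2 as the set-complement of ans over range(len(DATE_list)).  Objective: simpler.

-- ===== PORT A =====
def SetVACnext (MONTH_start : Int) (nDAY : Int) (DATE_list : List Int) : List Int × List Int :=
  match DATE_list with
  | [] => ([], [])  -- Python raises IndexError on DATE_list[0]; excluded by Pre_SetVACnext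
  | d0 :: _ =>
    let init : List Int × List Int :=
      if d0 ≠ 1 then ([0], [])
      else if MONTH_start = 0 ∧ d0 = 1 then ([0], [])
      else ([], [0])
    (PySem.List.enumerate DATE_list).foldl
      (fun acc p =>
        if p.1 = 0 then acc
        else if p.2 - 1 ≠ PySem.List.pyGetD DATE_list (p.1 - 1) 0 then (acc.1 ++ [p.1], acc.2)
        else (acc.1, acc.2 ++ [p.1]))
      init

-- ===== PORT B =====
def SetVACnext_alt (MONTH_start : Int) (nDAY : Int) (DATE_list : List Int) : List Int × List Int :=
  match DATE_list with
  | [] => ([], [])  -- DATE_list[0] raises IndexError; excluded by Pre_SetVACnext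
  | d0 :: _ =>
    let ans : List Int :=
      (if d0 ≠ 1 ∨ MONTH_start = 0 then [0] else []) ++
      (PySem.List.pyRange 1 (DATE_list.length : Int) 1).filter
        (fun i => decide (PySem.List.pyGetD DATE_list i 0 - 1 ≠ PySem.List.pyGetD DATE_list (i - 1) 0))
    let inAns : PySem.Set Int := PySem.Set.ofList ans
    let ans2 : List Int :=
      (PySem.List.pyRange 0 (DATE_list.length : Int) 1).filter
        (fun i => !(PySem.Set.contains inAns i))
    (ans, ans2)

-- ===== PRECONDITION & SPEC =====
-- Pre_ excludes only the empty list, on which A raises IndexError at DATE_list[0].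
def Pre_SetVACnext (MONTH_start : Int) (nDAY : Int) (DATE_list : List Int) : Prop := DATE_list ≠ []
instance (MONTH_start : Int) (nDAY : Int) (DATE_list : List Int) : Decidable (Pre_SetVACnext MONTH_start nDAY DATE_list) := by unfold Pre_SetVACnext; infer_instance
def pvWitness_SetVACnext : Int × Int × List Int := (0, 0, [1, 2, 4])

def Spec_SetVACnext (MONTH_start : Int) (nDAY : Int) (DATE_list : List Int) (out : List Int × List Int) : Prop := out = SetVACnext_alt MONTH_start nDAY DATE_list
instance (MONTH_start : Int) (nDAY : Int) (DATE_list : List Int) (out : List Int × List Int) : Decidable (Spec_SetVACnext MONTH_start nDAY DATE_list out) := by unfold Spec_SetVACnext; infer_instance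

-- ===== CLAIM (what is proved, stated in full; the proofs are below) =====
def Claim_equal_SetVACnext : Prop := ∀ (MONTH_start : Int) (nDAY : Int) (DATE_list : List Int), Dom_SetVACnext MONTH_start nDAY DATE_list → Pre_SetVACnext MONTH_start nDAY DATE_list → Spec_SetVACnext MONTH_start nDAY DATE_list (SetVACnext MONTH_start nDAY DATE_list)

-- ===== LEMMAS AND PROOFS =====

-- A's loop with two append accumulators is a partition by the branch test.
theorem pv_pairFold (c : Int → Prop) [DecidablePred c] :
    ∀ (l : List Int) (acc : List Int × List Int),
      l.foldl (fun acc j => if c j then (acc.1 ++ [j], acc.2) else (acc.1, acc.2 ++ [j])) acc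
        = (acc.1 ++ l.filter (fun j => decide (c j)),
           acc.2 ++ l.filter (fun j => !decide (c j))) := by
  intro l
  induction l with
  | nil => intro acc; simp
  | cons x xs ih =>
    intro acc
    by_cases h : c x <;> simp [List.foldl_cons, h, ih]


-- Bool form of set membership after ofList
theorem pv_contains_ofList (xs : List Int) (i : Int) :
    PySem.Set.contains (PySem.Set.ofList xs) i = decide (i ∈ xs) := by
  simp [PySem.Set.contains_eq_listContains, PySem.Set.mem_ofList]

-- the main equality on a nonempty list
theorem pv_main (M nD d0 : Int) (rest : List Int) :
    SetVACnext M nD (d0 :: rest) = SetVACnext_alt M nD (d0 :: rest) := by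
  have hn0 : (0:Int) < ((d0 :: rest).length : Int) := by
    have : 0 < (d0 :: rest).length := by simp
    exact_mod_cast this
  let n : Int := ((d0 :: rest).length : Int)
  let c : Int → Prop := fun j =>
    PySem.List.pyGetD (d0 :: rest) j 0 - 1 ≠ PySem.List.pyGetD (d0 :: rest) (j - 1) 0
  let c0 : Prop := d0 ≠ 1 ∨ M = 0
  let F : List Int := (PySem.List.pyRange 1 n 1).filter (fun j => decide (c j))
  let G : List Int := (PySem.List.pyRange 1 n 1).filter (fun j => !decide (c j))
  let a0 : List Int := if c0 then [0] else []
  -- membership characterisation of B's ans = a0 ++ F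
  have hansmem : ∀ i : Int, (i ∈ a0 ++ F ↔ (i = 0 ∧ c0) ∨ (1 ≤ i ∧ i < n ∧ c i)) := by
    intro i
    constructor
    · intro h
      rcases List.mem_append.mp h with h | h
      · left
        by_cases hx : c0
        · simp only [a0, hx, ite_true, List.mem_singleton] at h
          exact ⟨h, hx⟩
        · simp [a0, hx] at h
      · right
        have h2 := List.mem_filter.mp h
        have hr := PySem.List.mem_pyRange_one.mp h2.1
        exact ⟨hr.1, hr.2, of_decide_eq_true h2.2⟩
    · intro h
      rcases h with ⟨rfl, hx⟩ | ⟨h1, h2, hx⟩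
      · exact List.mem_append.mpr (Or.inl (by simp [a0, hx]))
      · refine List.mem_append.mpr (Or.inr ?_)
        exact List.mem_filter.mpr ⟨PySem.List.mem_pyRange_one.mpr ⟨h1, h2⟩, decide_eq_true hx⟩
  -- ===== A side =====
  have hA : SetVACnext M nD (d0 :: rest) = (a0 ++ F, (if c0 then [] else [0]) ++ G) := by
    rw [SetVACnext]
    have henum : PySem.List.enumerate (d0 :: rest) 0
        = (PySem.List.pyRange 0 n 1).map
            (fun j => (j, PySem.List.pyGetD (d0 :: rest) j 0)) := by
      have := PySem.List.enumerate_eq_map_pyRange (xs := d0 :: rest) (d := (0:Int))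
      simpa [n] using this
    rw [henum, List.foldl_map]
    rw [PySem.List.pyRange_one_cons hn0, List.foldl_cons]
    simp only [ite_true, zero_add]
    have hcong := PySem.List.foldl_congr_mem
      (l := PySem.List.pyRange 1 n 1)
      (f := fun (acc : List Int × List Int) (j : Int) =>
        if j = 0 then acc
        else if PySem.List.pyGetD (d0 :: rest) j 0 - 1 ≠ PySem.List.pyGetD (d0 :: rest) (j - 1) 0
          then (acc.1 ++ [j], acc.2) else (acc.1, acc.2 ++ [j]))
      (g := fun (acc : List Int × List Int) (j : Int) =>
        if c j then (acc.1 ++ [j], acc.2) else (acc.1, acc.2 ++ [j]))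
      (init := (if d0 ≠ 1 then (([0]:List Int), ([]:List Int))
        else if M = 0 ∧ d0 = 1 then ([0], []) else ([], [0])))
      (by intro acc j hj
          have hj1 : 1 ≤ j := (PySem.List.mem_pyRange_one.mp hj).1
          have hj0 : ¬ (j = 0) := by omega
          simp only [hj0, ite_false, c])
    rw [hcong, pv_pairFold]
    have hinit : (if d0 ≠ 1 then (([0] : List Int), ([] : List Int))
        else if M = 0 ∧ d0 = 1 then ([0], []) else ([], [0]))
        = (a0, if c0 then [] else [0]) := by
      by_cases h1 : d0 = 1
      · by_cases h2 : M = 0 <;> simp [h1, h2, a0, c0]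
      · simp [h1, a0, c0]
    rw [hinit]
  -- ===== B side =====
  have hB : SetVACnext_alt M nD (d0 :: rest) = (a0 ++ F, (if c0 then [] else [0]) ++ G) := by
    rw [SetVACnext_alt]
    rw [Prod.mk.injEq]
    refine ⟨by trivial, ?_⟩
    show ((PySem.List.pyRange 0 n 1).filter
        (fun i => !(PySem.Set.contains (PySem.Set.ofList (a0 ++ F)) i))) = _
    rw [PySem.List.pyRange_one_cons hn0]
    simp only [zero_add]
    rw [List.filter_cons]
    have h0 : (!(PySem.Set.contains (PySem.Set.ofList (a0 ++ F)) 0)) = !decide c0 := by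
      rw [pv_contains_ofList]
      congr 1
      simp only [decide_eq_decide, hansmem 0]
      constructor
      · rintro (⟨-, h⟩ | ⟨h, -⟩)
        · exact h
        · omega
      · intro h; exact Or.inl ⟨by trivial, h⟩
    rw [h0]
    have hrest : (PySem.List.pyRange 1 n 1).filter
        (fun i => !(PySem.Set.contains (PySem.Set.ofList (a0 ++ F)) i)) = G := by
      apply List.filter_congr
      intro i hi
      have hr := PySem.List.mem_pyRange_one.mp hi
      rw [pv_contains_ofList]
      congr 1
      simp only [decide_eq_decide, hansmem i]
      constructor
      · rintro (⟨h, -⟩ | ⟨-, -, h⟩)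
        · omega
        · exact h
      · intro h; exact Or.inr ⟨by omega, hr.2, h⟩
    rw [hrest]
    by_cases hx : c0 <;> simp [hx]
  rw [hA, hB]

-- ===== VERDICT (by name: the statement is the Claim_ definition above) =====
theorem SetVACnext_spec : Claim_equal_SetVACnext := by
  intro M nD L _ hpre
  obtain ⟨d0, rest, rfl⟩ := List.exists_cons_of_ne_nil hpre
  exact pv_main M nD d0 rest
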